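-- pv_equiv track=rewrite | github.com/jjoshua2/arc_agi | unsolved/2025-10-12T00-15-55Z/e73095fd_best2.py | transform
-- ===== SOURCE A (Python) =====
-- from collections import deque
--
-- def transform(grid: list[list[int]]) -> list[list[int]]:
--     if not grid or not grid[0]:
--         return []
--     rows = len(grid)
--     cols = len(grid[0])
--     visited = [[False] * cols for _ in range(rows)]
--     q = deque()
--     # Start from all 0s in top row
--     for j in range(cols):
--         if grid[0][j] == 0:
--             q.append((0, j))
--             visited[0][j] = True
--     directions = [(-1, 0), (1, 0), (0, -1), (0, 1)]
--     while q:
--         r, c = q.popleft()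
--         for dr, dc in directions:
--             nr, nc = r + dr, c + dc
--             if 0 <= nr < rows and 0 <= nc < cols and not visited[nr][nc] and grid[nr][nc] == 0:
--                 visited[nr][nc] = True
--                 q.append((nr, nc))
--     # Create output, change unreachable 0s to 4
--     output = [row[:] for row in grid]
--     for i in range(rows):
--         for j in range(cols):
--             if grid[i][j] == 0 and not visited[i][j]:
--                 output[i][j] = 4
--     return output
-- ===== SOURCE B (Python) =====
-- def transform(grid: list[list[int]]) -> list[list[int]]:
--     if not grid or not grid[0]:
--         return []
--     rows, cols = len(grid), len(grid[0])
--     # reachable set, grown by whole-grid sweeps until it stops changing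
--     reach = {(0, j) for j in range(cols) if grid[0][j] == 0}
--     while True:
--         new = {(i, j) for i in range(rows) for j in range(cols)
--                if grid[i][j] == 0 and ((i, j) in reach
--                    or (i - 1, j) in reach or (i + 1, j) in reach
--                    or (i, j - 1) in reach or (i, j + 1) in reach)}
--         if new == reach:
--             break
--         reach = new
--     # cells to recolor: unreachable 0s
--     bad = {(i, j) for i in range(rows) for j in range(cols)
--            if grid[i][j] == 0 and (i, j) not in reach}
--     return [[4 if (i, j) in bad else v for j, v in enumerate(row)]
--             for i, row in enumerate(grid)]
-- ===== Notes on version B (the rewrite author's own statement) =====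
-- stated objective: alternative
-- what changed: Replaces the queue-based BFS flood fill and the mutable visited matrix with iterated whole-grid sweeps (the reachable set is a set of coordinates recomputed by a monotone sweep until it stops changing), then computes the set of unreachable-0 cells and builds the output as one nested comprehension instead of copy-then-mutate.
import Mathlib
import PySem

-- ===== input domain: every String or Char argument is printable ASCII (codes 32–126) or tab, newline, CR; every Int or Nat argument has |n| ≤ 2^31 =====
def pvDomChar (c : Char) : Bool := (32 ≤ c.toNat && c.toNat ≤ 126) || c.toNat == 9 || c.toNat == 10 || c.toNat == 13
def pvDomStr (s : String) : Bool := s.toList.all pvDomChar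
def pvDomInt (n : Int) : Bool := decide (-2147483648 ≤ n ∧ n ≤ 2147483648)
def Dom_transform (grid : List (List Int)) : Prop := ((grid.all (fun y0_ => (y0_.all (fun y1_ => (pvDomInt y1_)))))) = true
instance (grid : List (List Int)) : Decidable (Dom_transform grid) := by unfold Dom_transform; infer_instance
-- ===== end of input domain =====

-- B replaces the queue-based BFS flood fill with iterated whole-grid sweeps of a coordinate set
-- until it stops changing, then recolors the computed set of unreachable-0 cells in one nested
-- comprehension (alternative algorithm, same values wherever A returns).


-- ===== PORT A =====
-- grid[r][c] (used only under in-range guards)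
def pvGet (grid : List (List Int)) (r c : Int) : Int :=
  PySem.List.pyGetD (PySem.List.pyGetD grid r []) c 0

-- visited[r][c]
def pvVGet (v : List (List Bool)) (r c : Int) : Bool :=
  PySem.List.pyGetD (PySem.List.pyGetD v r []) c false

-- visited[r][c] = True
def pvVSet (v : List (List Bool)) (r c : Int) : List (List Bool) :=
  PySem.List.pySetD v r (PySem.List.pySetD (PySem.List.pyGetD v r []) c true)

def pvDirs : List (Int × Int) := [(-1, 0), (1, 0), (0, -1), (0, 1)]

-- body of A's `while q` loop for one popped (r, c): the `for dr, dc in directions` loop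
def pvStep (grid : List (List Int)) (rows cols r c : Int)
    (vq : List (List Bool) × List (Int × Int)) : List (List Bool) × List (Int × Int) :=
  pvDirs.foldl (fun vq d =>
    if 0 ≤ r + d.1 ∧ r + d.1 < rows ∧ 0 ≤ c + d.2 ∧ c + d.2 < cols ∧
        pvVGet vq.1 (r + d.1) (c + d.2) = false ∧ pvGet grid (r + d.1) (c + d.2) = 0
    then (pvVSet vq.1 (r + d.1) (c + d.2), vq.2 ++ [(r + d.1, c + d.2)])
    else vq) vq

-- A's `while q` loop (fuel only makes it total; it is proved sufficient below)
def pvBFS (grid : List (List Int)) (rows cols : Int) :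
    Nat → List (List Bool) → List (Int × Int) → List (List Bool)
  | _, v, [] => v
  | 0, v, _ => v
  | fuel + 1, v, rc :: qt =>
      let vq := pvStep grid rows cols rc.1 rc.2 (v, qt)
      pvBFS grid rows cols fuel vq.1 vq.2

def transform (grid : List (List Int)) : List (List Int) :=
  if grid = [] ∨ grid.headD [] = [] then [] else
  let rows : Int := grid.length
  let cols : Int := (grid.headD []).length
  let v0 : List (List Bool) := List.replicate grid.length (List.replicate (grid.headD []).length false)
  let seeded := (PySem.List.pyRange 0 cols 1).foldl
      (fun (vq : List (List Bool) × List (Int × Int)) j =>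
        if pvGet grid 0 j = 0 then (pvVSet vq.1 0 j, vq.2 ++ [((0 : Int), j)]) else vq)
      (v0, [])
  let vfin := pvBFS grid rows cols
      (grid.length * (grid.headD []).length + (grid.headD []).length + 1) seeded.1 seeded.2
  (PySem.List.pyRange 0 rows 1).foldl (fun out i =>
    (PySem.List.pyRange 0 cols 1).foldl (fun out j =>
      if pvGet grid i j = 0 ∧ pvVGet vfin i j = false
      then PySem.List.pySetD out i (PySem.List.pySetD (PySem.List.pyGetD out i []) j 4)
      else out) out) grid

-- ===== PORT B =====
-- one whole-grid sweep: a cell joins the set if it is 0 and it or a neighbour is in the set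
def pvSweep (grid : List (List Int)) (rows cols : Int)
    (reach : PySem.Set (Int × Int)) : PySem.Set (Int × Int) :=
  PySem.Set.ofList ((PySem.List.pyRange 0 rows 1).flatMap fun i =>
    (PySem.List.pyRange 0 cols 1).filterMap fun j =>
      if pvGet grid i j = 0 ∧ ((i, j) ∈ reach ∨ (i - 1, j) ∈ reach ∨ (i + 1, j) ∈ reach ∨
          (i, j - 1) ∈ reach ∨ (i, j + 1) ∈ reach)
      then some (i, j) else none)

-- B's `while True` loop (fuel only makes it total; it is proved sufficient below)
def pvLoop (grid : List (List Int)) (rows cols : Int) :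
    Nat → PySem.Set (Int × Int) → PySem.Set (Int × Int)
  | 0, reach => reach
  | fuel + 1, reach =>
      let nw := pvSweep grid rows cols reach
      if PySem.Set.equal nw reach then reach else pvLoop grid rows cols fuel nw

-- cells to recolor: unreachable 0s
def pvBad (grid : List (List Int)) (rows cols : Int)
    (reach : PySem.Set (Int × Int)) : PySem.Set (Int × Int) :=
  PySem.Set.ofList ((PySem.List.pyRange 0 rows 1).flatMap fun i =>
    (PySem.List.pyRange 0 cols 1).filterMap fun j =>
      if pvGet grid i j = 0 ∧ (i, j) ∉ reach then some (i, j) else none)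

def transform_alt (grid : List (List Int)) : List (List Int) :=
  if grid = [] ∨ grid.headD [] = [] then [] else
  let rows : Int := grid.length
  let cols : Int := (grid.headD []).length
  let reach0 : PySem.Set (Int × Int) := PySem.Set.ofList
      ((PySem.List.pyRange 0 cols 1).filterMap fun j =>
        if pvGet grid 0 j = 0 then some ((0 : Int), j) else none)
  let reach := pvLoop grid rows cols (grid.length * (grid.headD []).length + 1) reach0
  let bad := pvBad grid rows cols reach
  (PySem.List.enumerate grid).map fun p =>
    (PySem.List.enumerate p.2).map fun q =>
      if (p.1, q.1) ∈ bad then 4 else q.2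

-- ===== PRECONDITION & SPEC =====
-- Pre_ excludes exactly the grids on which A raises: a row shorter than the first row makes
-- A's output-marking loop (and the BFS neighbour read) raise IndexError.
def Pre_transform (grid : List (List Int)) : Prop :=
  ∀ row ∈ grid, (grid.headD []).length ≤ row.length
instance (grid : List (List Int)) : Decidable (Pre_transform grid) := by
  unfold Pre_transform; infer_instance

def pvWitness_transform : List (List Int) := [[0, 1, 0], [1, 0, 0], [0, 1, 1]]

def Spec_transform (grid : List (List Int)) (out : List (List Int)) : Prop := out = transform_alt grid
instance (grid : List (List Int)) (out : List (List Int)) : Decidable (Spec_transform grid out) := by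
  unfold Spec_transform; infer_instance

-- ===== CLAIM (what is proved, stated in full; the proofs are below) =====
def Claim_equal_transform : Prop :=
  ∀ (grid : List (List Int)), Dom_transform grid → Pre_transform grid →
    Spec_transform grid (transform grid)

-- ===== LEMMAS AND PROOFS =====

-- reachability by a path of 0-cells from a 0-cell of the top row
def Adj (r c r' c' : Int) : Prop :=
  (r' = r - 1 ∧ c' = c) ∨ (r' = r + 1 ∧ c' = c) ∨ (r' = r ∧ c' = c - 1) ∨ (r' = r ∧ c' = c + 1)

inductive Reach (grid : List (List Int)) : Int → Int → Prop where
  | seed (j : Int) : 0 ≤ j → j < ((grid.headD []).length : Int) → pvGet grid 0 j = 0 →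
      Reach grid 0 j
  | step (r c r' c' : Int) : Reach grid r c → Adj r c r' c' →
      0 ≤ r' → r' < (grid.length : Int) → 0 ≤ c' → c' < ((grid.headD []).length : Int) →
      pvGet grid r' c' = 0 → Reach grid r' c'


-- Nat-indexed views of the cell accessors (all code accesses are under in-range guards)
def vgetN (v : List (List Bool)) (r c : Nat) : Bool := (v.getD r []).getD c false
def ggetN (g : List (List Int)) (r c : Nat) : Int := (g.getD r []).getD c 0
def vsetN (v : List (List Bool)) (r c : Nat) : List (List Bool) :=
  v.set r ((v.getD r []).set c true)

theorem pvVGet_toNat (v : List (List Bool)) (r c : Int) (hr : 0 ≤ r) (hc : 0 ≤ c) :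
    pvVGet v r c = vgetN v r.toNat c.toNat := by
  obtain ⟨rn, rfl⟩ := Int.eq_ofNat_of_zero_le hr
  obtain ⟨cn, rfl⟩ := Int.eq_ofNat_of_zero_le hc
  simp [pvVGet, vgetN, PySem.List.pyGetD_natCast]

theorem pvGet_toNat (g : List (List Int)) (r c : Int) (hr : 0 ≤ r) (hc : 0 ≤ c) :
    pvGet g r c = ggetN g r.toNat c.toNat := by
  obtain ⟨rn, rfl⟩ := Int.eq_ofNat_of_zero_le hr
  obtain ⟨cn, rfl⟩ := Int.eq_ofNat_of_zero_le hc
  simp [pvGet, ggetN, PySem.List.pyGetD_natCast]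

theorem pvVSet_toNat (v : List (List Bool)) (r c : Int) (hr : 0 ≤ r) (hc : 0 ≤ c) :
    pvVSet v r c = vsetN v r.toNat c.toNat := by
  obtain ⟨rn, rfl⟩ := Int.eq_ofNat_of_zero_le hr
  obtain ⟨cn, rfl⟩ := Int.eq_ofNat_of_zero_le hc
  simp [pvVSet, vsetN, PySem.List.pyGetD_natCast, PySem.List.pySetD_natCast]

theorem getD_set_self {α : Type} (l : List α) (n : Nat) (a d : α) (h : n < l.length) :
    (l.set n a).getD n d = a := by
  rw [List.getD_eq_getElem?_getD, List.getElem?_set_self h, Option.getD_some]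

theorem getD_set_ne {α : Type} (l : List α) (n m : Nat) (a d : α) (h : n ≠ m) :
    (l.set n a).getD m d = l.getD m d := by
  rw [List.getD_eq_getElem?_getD, List.getElem?_set_ne h, ← List.getD_eq_getElem?_getD]

theorem vgetN_vsetN_iff (v : List (List Bool)) (r c r' c' : Nat) :
    vgetN (vsetN v r c) r' c' = true ↔
      vgetN v r' c' = true ∨ (r' = r ∧ c' = c ∧ r < v.length ∧ c < (v.getD r []).length) := by
  unfold vgetN vsetN
  by_cases hrr : r' = r
  · subst hrr
    by_cases hr : r' < v.length
    · rw [getD_set_self _ _ _ _ hr]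
      by_cases hcc : c' = c
      · subst hcc
        by_cases hc : c' < (v.getD r' []).length
        · rw [getD_set_self _ _ _ _ hc]
          exact iff_of_true rfl (Or.inr ⟨rfl, rfl, hr, hc⟩)
        · rw [List.set_eq_of_length_le (by omega)]
          exact ⟨Or.inl, fun h => h.elim id (fun h2 => absurd h2.2.2.2 hc)⟩
      · rw [getD_set_ne _ _ _ _ _ (fun h => hcc h.symm)]
        simp [hcc]
    · rw [List.set_eq_of_length_le (l := v) (by omega)]
      simp [hr]
  · rw [getD_set_ne _ _ _ _ _ (fun h => hrr h.symm)]
    simp [hrr]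


theorem vsetN_mono (v : List (List Bool)) (r c r' c' : Nat) (h : vgetN v r' c' = true) :
    vgetN (vsetN v r c) r' c' = true :=
  (vgetN_vsetN_iff v r c r' c').mpr (Or.inl h)

def VShape (grid : List (List Int)) (v : List (List Bool)) : Prop :=
  v.length = grid.length ∧ ∀ row ∈ v, row.length = (grid.headD []).length

theorem getD_mem_of_lt {α : Type} (l : List α) (r : Nat) (d : α) (h : r < l.length) :
    l.getD r d ∈ l := by
  rw [List.getD_eq_getElem?_getD, List.getElem?_eq_getElem h, Option.getD_some]
  exact List.getElem_mem h

theorem VShape_row_len {grid : List (List Int)} {v : List (List Bool)} (h : VShape grid v)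
    {r : Nat} (hr : r < v.length) : (v.getD r []).length = (grid.headD []).length :=
  h.2 _ (getD_mem_of_lt v r [] hr)

theorem VShape_vsetN {grid : List (List Int)} {v : List (List Bool)} (h : VShape grid v)
    (r c : Nat) (hr : r < v.length) : VShape grid (vsetN v r c) := by
  refine ⟨by simp [vsetN, h.1], ?_⟩
  intro row hrow
  rcases List.mem_or_eq_of_mem_set hrow with hm | rfl
  · exact h.2 _ hm
  · rw [List.length_set]
    exact VShape_row_len h hr

def cf (v : List (List Bool)) : Nat := (v.map fun row => row.count false).sum

theorem count_false_set (row : List Bool) (c : Nat) (hc : c < row.length)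
    (hf : row.getD c false = false) :
    (row.set c true).count false + 1 = row.count false := by
  induction row generalizing c with
  | nil => simp at hc
  | cons b t ih =>
    cases c with
    | zero =>
      simp only [List.getD_cons_zero] at hf
      subst hf
      simp
    | succ n =>
      simp only [List.getD_cons_succ] at hf
      simp only [List.length_cons, Nat.add_lt_add_iff_right] at hc
      have := ih n hc hf
      simp only [List.set_cons_succ, List.count_cons]
      omega

theorem cf_vsetN (v : List (List Bool)) (r c : Nat) (hr : r < v.length)
    (hc : c < (v.getD r []).length) (hf : vgetN v r c = false) :
    cf (vsetN v r c) + 1 = cf v := by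
  induction v generalizing r with
  | nil => simp at hr
  | cons row t ih =>
    cases r with
    | zero =>
      simp only [List.getD_cons_zero] at hc hf ⊢
      unfold vgetN at hf
      simp only [List.getD_cons_zero] at hf
      have := count_false_set row c hc hf
      simp only [vsetN, List.getD_cons_zero, List.set_cons_zero, cf, List.map_cons,
        List.sum_cons]
      omega
    | succ n =>
      simp only [List.getD_cons_succ] at hc
      simp only [List.length_cons, Nat.add_lt_add_iff_right] at hr
      unfold vgetN at hf
      simp only [List.getD_cons_succ] at hf
      have := ih n hr hc hf
      simp only [vsetN, List.getD_cons_succ, List.set_cons_succ, cf, List.map_cons,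
        List.sum_cons] at this ⊢
      omega

theorem cf_replicate (R C : Nat) : cf (List.replicate R (List.replicate C false)) = R * C := by
  simp [cf, List.map_replicate, List.sum_replicate, smul_eq_mul]

theorem vgetN_replicate (R C r c : Nat) :
    vgetN (List.replicate R (List.replicate C false)) r c = false := by
  unfold vgetN
  have h1 : (List.replicate R (List.replicate C false)).getD r [] =
      if r < R then List.replicate C false else [] := by
    rw [List.getD_eq_getElem?_getD, List.getElem?_replicate]
    split <;> simp
  rw [h1]
  split
  · rw [List.getD_eq_getElem?_getD, List.getElem?_replicate]
    split <;> simp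
  · simp


def InR (grid : List (List Int)) (r c : Int) : Prop :=
  0 ≤ r ∧ r < (grid.length : Int) ∧ 0 ≤ c ∧ c < ((grid.headD []).length : Int)

def ClosedAt (grid : List (List Int)) (v : List (List Bool)) (r c : Int) : Prop :=
  ∀ r' c' : Int, Adj r c r' c' → InR grid r' c' → pvGet grid r' c' = 0 → pvVGet v r' c' = true

theorem adj_of_dir (r c : Int) (d : Int × Int) (hd : d ∈ pvDirs) :
    Adj r c (r + d.1) (c + d.2) := by
  simp only [pvDirs, List.mem_cons, List.not_mem_nil, or_false] at hd
  rcases hd with rfl | rfl | rfl | rfl <;> simp [Adj] <;> omega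

theorem dir_of_adj (r c r' c' : Int) (h : Adj r c r' c') :
    ∃ d ∈ pvDirs, r' = r + d.1 ∧ c' = c + d.2 := by
  rcases h with ⟨rfl, rfl⟩ | ⟨rfl, rfl⟩ | ⟨rfl, rfl⟩ | ⟨rfl, rfl⟩
  · exact ⟨(-1, 0), by simp [pvDirs], by constructor <;> omega⟩
  · exact ⟨(1, 0), by simp [pvDirs], by constructor <;> omega⟩
  · exact ⟨(0, -1), by simp [pvDirs], by constructor <;> omega⟩
  · exact ⟨(0, 1), by simp [pvDirs], by constructor <;> omega⟩

theorem pvVGet_vset_iff {grid : List (List Int)} {v : List (List Bool)} (hsh : VShape grid v)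
    {r c : Int} (h1 : InR grid r c) (r' c' : Int) (h2 : 0 ≤ r') (h3 : 0 ≤ c') :
    pvVGet (pvVSet v r c) r' c' = true ↔ (pvVGet v r' c' = true ∨ (r' = r ∧ c' = c)) := by
  obtain ⟨hr0, hr1, hc0, hc1⟩ := h1
  rw [pvVSet_toNat v r c hr0 hc0, pvVGet_toNat _ r' c' h2 h3, pvVGet_toNat v r' c' h2 h3]
  rw [vgetN_vsetN_iff]
  have hvl := hsh.1
  have hrl : r.toNat < v.length := by omega
  have hcl : c.toNat < (v.getD r.toNat []).length := by
    rw [VShape_row_len hsh hrl]; omega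
  constructor
  · rintro (h | ⟨e1, e2, _, _⟩)
    · exact Or.inl h
    · exact Or.inr ⟨by omega, by omega⟩
  · rintro (h | ⟨e1, e2⟩)
    · exact Or.inl h
    · exact Or.inr ⟨by omega, by omega, hrl, hcl⟩

theorem pvVGet_vset_mono {v : List (List Bool)} {r c r' c' : Int}
    (hr : 0 ≤ r) (hc : 0 ≤ c) (h2 : 0 ≤ r') (h3 : 0 ≤ c')
    (h : pvVGet v r' c' = true) : pvVGet (pvVSet v r c) r' c' = true := by
  rw [pvVSet_toNat v r c hr hc, pvVGet_toNat _ r' c' h2 h3]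
  rw [pvVGet_toNat v r' c' h2 h3] at h
  exact vsetN_mono _ _ _ _ _ h

theorem shape_pvVSet {grid : List (List Int)} {v : List (List Bool)} (hsh : VShape grid v)
    {r c : Int} (h1 : InR grid r c) : VShape grid (pvVSet v r c) := by
  obtain ⟨hr0, hr1, hc0, hc1⟩ := h1
  rw [pvVSet_toNat v r c hr0 hc0]
  have hvl := hsh.1
  exact VShape_vsetN hsh _ _ (by omega)

theorem cf_pvVSet {grid : List (List Int)} {v : List (List Bool)} (hsh : VShape grid v)
    {r c : Int} (h1 : InR grid r c) (hf : pvVGet v r c = false) :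
    cf (pvVSet v r c) + 1 = cf v := by
  obtain ⟨hr0, hr1, hc0, hc1⟩ := h1
  rw [pvVSet_toNat v r c hr0 hc0]
  have hvl := hsh.1
  have hrl : r.toNat < v.length := by omega
  refine cf_vsetN v _ _ hrl (by rw [VShape_row_len hsh hrl]; omega) ?_
  rw [pvVGet_toNat v r c hr0 hc0] at hf
  exact hf

structure AInv (grid : List (List Int)) (v : List (List Bool)) (q : List (Int × Int)) : Prop where
  shape : VShape grid v
  qmem : ∀ p ∈ q, InR grid p.1 p.2 ∧ pvVGet v p.1 p.2 = true
  sound : ∀ r c : Int, InR grid r c → pvVGet v r c = true → Reach grid r c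
  seeds : ∀ j : Int, 0 ≤ j → j < ((grid.headD []).length : Int) → pvGet grid 0 j = 0 →
    pvVGet v 0 j = true
  closed : ∀ r c : Int, InR grid r c → pvVGet v r c = true → (r, c) ∈ q ∨ ClosedAt grid v r c

structure SInv (grid : List (List Int)) (r c : Int) (S : List (Int × Int))
    (vq : List (List Bool) × List (Int × Int)) : Prop where
  shape : VShape grid vq.1
  qmem : ∀ p ∈ vq.2, InR grid p.1 p.2 ∧ pvVGet vq.1 p.1 p.2 = true
  sound : ∀ r0 c0 : Int, InR grid r0 c0 → pvVGet vq.1 r0 c0 = true → Reach grid r0 c0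
  seeds : ∀ j : Int, 0 ≤ j → j < ((grid.headD []).length : Int) → pvGet grid 0 j = 0 →
    pvVGet vq.1 0 j = true
  pclosed : ∀ r0 c0 : Int, InR grid r0 c0 → pvVGet vq.1 r0 c0 = true →
    (r0, c0) ∈ vq.2 ∨ (r0 = r ∧ c0 = c) ∨ ClosedAt grid vq.1 r0 c0
  done : ∀ d ∈ S, InR grid (r + d.1) (c + d.2) → pvGet grid (r + d.1) (c + d.2) = 0 →
    pvVGet vq.1 (r + d.1) (c + d.2) = true


def stepF (grid : List (List Int)) (r c : Int)
    (vq : List (List Bool) × List (Int × Int)) (d : Int × Int) :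
    List (List Bool) × List (Int × Int) :=
  if 0 ≤ r + d.1 ∧ r + d.1 < (grid.length : Int) ∧ 0 ≤ c + d.2 ∧
      c + d.2 < ((grid.headD []).length : Int) ∧
      pvVGet vq.1 (r + d.1) (c + d.2) = false ∧ pvGet grid (r + d.1) (c + d.2) = 0
  then (pvVSet vq.1 (r + d.1) (c + d.2), vq.2 ++ [(r + d.1, c + d.2)])
  else vq

theorem pvStep_eq (grid : List (List Int)) (r c : Int)
    (vq : List (List Bool) × List (Int × Int)) :
    pvStep grid (grid.length : Int) ((grid.headD []).length : Int) r c vq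
      = pvDirs.foldl (stepF grid r c) vq := rfl

theorem stepF_sinv (grid : List (List Int)) (r c : Int) (hR : Reach grid r c)
    (S : List (Int × Int)) (d : Int × Int) (hd : d ∈ pvDirs)
    (v : List (List Bool)) (q : List (Int × Int)) (h : SInv grid r c S (v, q)) :
    SInv grid r c (d :: S) (stepF grid r c (v, q) d) ∧
    cf (stepF grid r c (v, q) d).1 + (stepF grid r c (v, q) d).2.length ≤ cf v + q.length ∧
    ∃ ext, (stepF grid r c (v, q) d).2 = q ++ ext := by
  unfold stepF
  by_cases hg : 0 ≤ r + d.1 ∧ r + d.1 < (grid.length : Int) ∧ 0 ≤ c + d.2 ∧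
      c + d.2 < ((grid.headD []).length : Int) ∧
      pvVGet (v, q).1 (r + d.1) (c + d.2) = false ∧ pvGet grid (r + d.1) (c + d.2) = 0
  · rw [if_pos hg]
    obtain ⟨g1, g2, g3, g4, g5, g6⟩ := hg
    have hInN : InR grid (r + d.1) (c + d.2) := ⟨g1, g2, g3, g4⟩
    refine ⟨⟨?_, ?_, ?_, ?_, ?_, ?_⟩, ?_, ⟨[(r + d.1, c + d.2)], rfl⟩⟩
    · exact shape_pvVSet h.shape hInN
    · intro p hp
      rcases List.mem_append.mp hp with hp | hp
      · obtain ⟨hin, htr⟩ := h.qmem p hp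
        exact ⟨hin, pvVGet_vset_mono g1 g3 hin.1 hin.2.2.1 htr⟩
      · have : p = (r + d.1, c + d.2) := by simpa using hp
        subst this
        exact ⟨hInN, (pvVGet_vset_iff h.shape hInN _ _ g1 g3).mpr (Or.inr ⟨rfl, rfl⟩)⟩
    · intro r0 c0 hIn0 htrue
      rcases (pvVGet_vset_iff h.shape hInN r0 c0 hIn0.1 hIn0.2.2.1).mp htrue with hold | ⟨rfl, rfl⟩
      · exact h.sound _ _ hIn0 hold
      · exact Reach.step r c _ _ hR (adj_of_dir r c d hd) g1 g2 g3 g4 g6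
    · intro j h1 h2 h3
      exact pvVGet_vset_mono g1 g3 le_rfl h1 (h.seeds j h1 h2 h3)
    · intro r0 c0 hIn0 htrue
      rcases (pvVGet_vset_iff h.shape hInN r0 c0 hIn0.1 hIn0.2.2.1).mp htrue with hold | ⟨rfl, rfl⟩
      · rcases h.pclosed r0 c0 hIn0 hold with hq | hrc | hcl
        · exact Or.inl (List.mem_append.mpr (Or.inl hq))
        · exact Or.inr (Or.inl hrc)
        · refine Or.inr (Or.inr ?_)
          intro r' c' hadj hin' hz
          exact pvVGet_vset_mono g1 g3 hin'.1 hin'.2.2.1 (hcl r' c' hadj hin' hz)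
      · exact Or.inl (List.mem_append.mpr (Or.inr (by simp)))
    · intro d' hd' hin' hz
      rcases List.mem_cons.mp hd' with rfl | hmem
      · exact (pvVGet_vset_iff h.shape hInN _ _ hin'.1 hin'.2.2.1).mpr (Or.inr ⟨rfl, rfl⟩)
      · exact pvVGet_vset_mono g1 g3 hin'.1 hin'.2.2.1 (h.done d' hmem hin' hz)
    · have : cf (pvVSet v (r + d.1) (c + d.2)) + 1 = cf v :=
        cf_pvVSet (v := v) h.shape hInN g5
      simp only [List.length_append, List.length_cons, List.length_nil]
      omega
  · rw [if_neg hg]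
    refine ⟨⟨h.shape, h.qmem, h.sound, h.seeds, h.pclosed, ?_⟩, le_rfl, ⟨[], by simp⟩⟩
    intro d' hd' hin' hz
    rcases List.mem_cons.mp hd' with rfl | hmem
    · by_contra hfalse
      exact hg ⟨hin'.1, hin'.2.1, hin'.2.2.1, hin'.2.2.2,
        Bool.not_eq_true _ ▸ (Bool.eq_false_iff.mpr (fun htr => hfalse htr)), hz⟩
    · exact h.done d' hmem hin' hz

theorem fold_sinv (grid : List (List Int)) (r c : Int) (hR : Reach grid r c) :
    ∀ (ds : List (Int × Int)) (S : List (Int × Int)) (v : List (List Bool))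
      (q : List (Int × Int)), (∀ d ∈ ds, d ∈ pvDirs) → SInv grid r c S (v, q) →
      SInv grid r c (ds.reverse ++ S) (ds.foldl (stepF grid r c) (v, q)) ∧
      cf (ds.foldl (stepF grid r c) (v, q)).1 + (ds.foldl (stepF grid r c) (v, q)).2.length ≤
        cf v + q.length ∧
      ∃ ext, (ds.foldl (stepF grid r c) (v, q)).2 = q ++ ext := by
  intro ds
  induction ds with
  | nil =>
    intro S v q _ h
    exact ⟨by simpa using h, le_rfl, ⟨[], by simp⟩⟩
  | cons d ds ih =>
    intro S v q hsub h
    rw [List.foldl_cons]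
    have h1 := stepF_sinv grid r c hR S d (hsub d (List.mem_cons_self)) v q h
    rcases hst : stepF grid r c (v, q) d with ⟨v1, q1⟩
    rw [hst] at h1
    obtain ⟨hS1, hm1, ⟨ext1, hext1⟩⟩ := h1
    have h2 := ih (d :: S) v1 q1 (fun d' hd' => hsub d' (List.mem_cons_of_mem _ hd')) hS1
    obtain ⟨hS2, hm2, ⟨ext2, hext2⟩⟩ := h2
    refine ⟨?_, ?_, ?_⟩
    · have : ds.reverse ++ (d :: S) = (d :: ds).reverse ++ S := by
        simp
      rwa [this] at hS2
    · subst hext1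
      simp only [List.length_append] at hm1 hm2 ⊢
      omega
    · subst hext1
      exact ⟨ext1 ++ ext2, by rw [hext2, List.append_assoc]⟩



theorem pop_ainv (grid : List (List Int)) (v : List (List Bool)) (rc : Int × Int)
    (qt : List (Int × Int)) (h : AInv grid v (rc :: qt)) :
    AInv grid (pvStep grid (grid.length : Int) ((grid.headD []).length : Int) rc.1 rc.2 (v, qt)).1
        (pvStep grid (grid.length : Int) ((grid.headD []).length : Int) rc.1 rc.2 (v, qt)).2 ∧
      cf (pvStep grid (grid.length : Int) ((grid.headD []).length : Int) rc.1 rc.2 (v, qt)).1 +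
        (pvStep grid (grid.length : Int) ((grid.headD []).length : Int) rc.1 rc.2 (v, qt)).2.length ≤
        cf v + qt.length := by
  have hq := h.qmem rc List.mem_cons_self
  have hR : Reach grid rc.1 rc.2 := h.sound rc.1 rc.2 hq.1 hq.2
  have h0 : SInv grid rc.1 rc.2 [] (v, qt) :=
    { shape := h.shape
      qmem := fun p hp => h.qmem p (List.mem_cons_of_mem _ hp)
      sound := h.sound
      seeds := h.seeds
      pclosed := fun r0 c0 hin ht => by
        rcases h.closed r0 c0 hin ht with hmem | hcl
        · rcases List.mem_cons.mp hmem with heq | hmem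
          · exact Or.inr (Or.inl ⟨congrArg Prod.fst heq, congrArg Prod.snd heq⟩)
          · exact Or.inl hmem
        · exact Or.inr (Or.inr hcl)
      done := by intro d hd; exact absurd hd (List.not_mem_nil) }
  rw [pvStep_eq]
  obtain ⟨hS, hm, -⟩ := fold_sinv grid rc.1 rc.2 hR pvDirs [] v qt (fun d hd => hd) h0
  refine ⟨⟨hS.shape, hS.qmem, hS.sound, hS.seeds, ?_⟩, hm⟩
  intro r0 c0 hin ht
  rcases hS.pclosed r0 c0 hin ht with hmem | ⟨e1, e2⟩ | hcl
  · exact Or.inl hmem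
  · subst e1; subst e2
    refine Or.inr ?_
    intro r' c' hadj hin' hz
    obtain ⟨d, hd, e1, e2⟩ := dir_of_adj rc.1 rc.2 r' c' hadj
    subst e1; subst e2
    exact hS.done d (by simpa using hd) hin' hz
  · exact Or.inr hcl

theorem pvBFS_ainv (grid : List (List Int)) :
    ∀ (fuel : Nat) (v : List (List Bool)) (q : List (Int × Int)),
      AInv grid v q → q.length + cf v ≤ fuel →
      AInv grid (pvBFS grid (grid.length : Int) ((grid.headD []).length : Int) fuel v q) [] := by
  intro fuel
  induction fuel with
  | zero =>
    intro v q h hle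
    cases q with
    | nil => exact h
    | cons rc qt => simp at hle
  | succ fuel ih =>
    intro v q h hle
    cases q with
    | nil => exact h
    | cons rc qt =>
      show AInv grid (pvBFS grid _ _ fuel
        (pvStep grid _ _ rc.1 rc.2 (v, qt)).1 (pvStep grid _ _ rc.1 rc.2 (v, qt)).2) []
      obtain ⟨hinv, hm⟩ := pop_ainv grid v rc qt h
      refine ih _ _ hinv ?_
      simp only [List.length_cons] at hle
      omega

theorem reach_inR (grid : List (List Int)) (hg : grid ≠ []) (r c : Int)
    (h : Reach grid r c) : InR grid r c := by
  induction h with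
  | seed j h1 h2 h3 =>
    have : 0 < grid.length := List.length_pos_iff.mpr hg
    exact ⟨le_rfl, by exact_mod_cast this, h1, h2⟩
  | step r0 c0 r' c' hR hadj b1 b2 b3 b4 hz ih => exact ⟨b1, b2, b3, b4⟩

theorem afinal_iff (grid : List (List Int)) (vf : List (List Bool))
    (h : AInv grid vf []) (hg : grid ≠ []) :
    ∀ r c : Int, InR grid r c → (pvVGet vf r c = true ↔ Reach grid r c) := by
  have haux : ∀ r c : Int, Reach grid r c → pvVGet vf r c = true := by
    intro r c hR
    induction hR with
    | seed j h1 h2 h3 => exact h.seeds j h1 h2 h3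
    | step r0 c0 r' c' hR0 hadj b1 b2 b3 b4 hz ih =>
      rcases h.closed r0 c0 (reach_inR grid hg r0 c0 hR0) ih with hmem | hcl
      · exact absurd hmem (List.not_mem_nil)
      · exact hcl r' c' hadj ⟨b1, b2, b3, b4⟩ hz
  intro r c hin
  exact ⟨h.sound r c hin, haux r c⟩


def seedF (grid : List (List Int)) (vq : List (List Bool) × List (Int × Int)) (j : Int) :
    List (List Bool) × List (Int × Int) :=
  if pvGet grid 0 j = 0 then (pvVSet vq.1 0 j, vq.2 ++ [((0 : Int), j)]) else vq

structure SeedInv (grid : List (List Int)) (S : List Int)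
    (vq : List (List Bool) × List (Int × Int)) : Prop where
  shape : VShape grid vq.1
  char : ∀ r c : Int, InR grid r c → (pvVGet vq.1 r c = true ↔ (r, c) ∈ vq.2)
  qok : ∀ p ∈ vq.2, p.1 = 0 ∧ InR grid p.1 p.2 ∧ pvGet grid p.1 p.2 = 0
  qcols : ∀ p ∈ vq.2, p.2 ∈ S
  meas : cf vq.1 + vq.2.length ≤ grid.length * (grid.headD []).length
  seeds : ∀ j ∈ S, pvGet grid 0 j = 0 → InR grid 0 j → pvVGet vq.1 0 j = true

theorem seedF_inv (grid : List (List Int)) (hg : grid ≠ []) (S : List Int) (j : Int)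
    (hj0 : 0 ≤ j) (hj1 : j < ((grid.headD []).length : Int)) (hjS : j ∉ S)
    (v : List (List Bool)) (q : List (Int × Int)) (h : SeedInv grid S (v, q)) :
    SeedInv grid (j :: S) (seedF grid (v, q) j) := by
  have hrows : (0 : Int) < (grid.length : Int) := by
    exact_mod_cast List.length_pos_iff.mpr hg
  have hInj : InR grid 0 j := ⟨le_rfl, hrows, hj0, hj1⟩
  unfold seedF
  by_cases hz : pvGet grid 0 j = 0
  · rw [if_pos hz]
    have hnew : pvVGet v 0 j = false := by
      rcases Bool.eq_false_or_eq_true (pvVGet v 0 j) with ht | hf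
      · exact absurd (h.qcols _ ((h.char 0 j hInj).mp ht)) hjS
      · exact hf
    refine ⟨?_, ?_, ?_, ?_, ?_, ?_⟩
    · exact shape_pvVSet h.shape hInj
    · intro r c hin
      rw [pvVGet_vset_iff h.shape hInj r c hin.1 hin.2.2.1, h.char r c hin]
      simp [Prod.ext_iff]
    · intro p hp
      rcases List.mem_append.mp hp with hp | hp
      · exact h.qok p hp
      · have : p = ((0 : Int), j) := by simpa using hp
        subst this
        exact ⟨rfl, hInj, hz⟩
    · intro p hp
      rcases List.mem_append.mp hp with hp | hp
      · exact List.mem_cons_of_mem _ (h.qcols p hp)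
      · have : p = ((0 : Int), j) := by simpa using hp
        subst this
        exact List.mem_cons_self
    · have h5 : cf (pvVSet v 0 j) + 1 = cf v := cf_pvVSet (v := v) h.shape hInj hnew
      have hm : cf v + q.length ≤ grid.length * (grid.headD []).length := h.meas
      simp only [List.length_append, List.length_cons, List.length_nil]
      omega
    · intro j' hj' hz' hin'
      rcases List.mem_cons.mp hj' with rfl | hmem
      · exact (pvVGet_vset_iff h.shape hInj _ _ hin'.1 hin'.2.2.1).mpr (Or.inr ⟨rfl, rfl⟩)
      · exact pvVGet_vset_mono le_rfl hj0 hin'.1 hin'.2.2.1 (h.seeds j' hmem hz' hin')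
  · rw [if_neg hz]
    refine ⟨h.shape, h.char, h.qok,
      fun p hp => List.mem_cons_of_mem _ (h.qcols p hp), h.meas, ?_⟩
    intro j' hj' hz' hin'
    rcases List.mem_cons.mp hj' with rfl | hmem
    · exact absurd hz' hz
    · exact h.seeds j' hmem hz' hin'

theorem seed_fold_inv (grid : List (List Int)) (hg : grid ≠ []) :
    ∀ (js : List Int), js.Nodup → (∀ j ∈ js, 0 ≤ j ∧ j < ((grid.headD []).length : Int)) →
      ∀ (S : List Int) (v : List (List Bool)) (q : List (Int × Int)),
        (∀ j ∈ js, j ∉ S) → SeedInv grid S (v, q) →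
        SeedInv grid (js.reverse ++ S) (js.foldl (seedF grid) (v, q)) := by
  intro js
  induction js with
  | nil => intro _ _ S v q _ h; simpa using h
  | cons j js ih =>
    intro hnd hb S v q hdisj h
    rw [List.foldl_cons]
    have h1 := seedF_inv grid hg S j (hb j List.mem_cons_self).1 (hb j List.mem_cons_self).2
      (hdisj j List.mem_cons_self) v q h
    rcases hst : seedF grid (v, q) j with ⟨v1, q1⟩
    rw [hst] at h1
    have h2 := ih (List.nodup_cons.mp hnd).2
      (fun j' hj' => hb j' (List.mem_cons_of_mem _ hj')) (j :: S) v1 q1 ?_ h1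
    · have : js.reverse ++ (j :: S) = (j :: js).reverse ++ S := by simp
      rwa [this] at h2
    · intro j' hj'
      rw [List.mem_cons]
      rintro (rfl | hmem)
      · exact (List.nodup_cons.mp hnd).1 hj'
      · exact hdisj j' (List.mem_cons_of_mem _ hj') hmem

theorem seed_ainv (grid : List (List Int)) (hg : grid ≠ []) :
    AInv grid ((PySem.List.pyRange 0 ((grid.headD []).length : Int) 1).foldl (seedF grid)
        (List.replicate grid.length (List.replicate (grid.headD []).length false), [])).1
      ((PySem.List.pyRange 0 ((grid.headD []).length : Int) 1).foldl (seedF grid)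
        (List.replicate grid.length (List.replicate (grid.headD []).length false), [])).2 ∧
    ((PySem.List.pyRange 0 ((grid.headD []).length : Int) 1).foldl (seedF grid)
        (List.replicate grid.length (List.replicate (grid.headD []).length false), [])).2.length +
      cf ((PySem.List.pyRange 0 ((grid.headD []).length : Int) 1).foldl (seedF grid)
        (List.replicate grid.length (List.replicate (grid.headD []).length false), [])).1 ≤
      grid.length * (grid.headD []).length + (grid.headD []).length + 1 := by
  have h0 : SeedInv grid [] (List.replicate grid.length (List.replicate (grid.headD []).length false), []) := by
    refine ⟨⟨by simp, ?_⟩, ?_, ?_, ?_, ?_, ?_⟩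
    · intro row hrow
      rw [List.eq_of_mem_replicate hrow]
      simp
    · intro r c hin
      rw [pvVGet_toNat _ r c hin.1 hin.2.2.1, vgetN_replicate]
      simp
    · intro p hp; exact absurd hp (List.not_mem_nil)
    · intro p hp; exact absurd hp (List.not_mem_nil)
    · simp [cf_replicate]
    · intro j hj; exact absurd hj (List.not_mem_nil)
  have hfold := seed_fold_inv grid hg (PySem.List.pyRange 0 ((grid.headD []).length : Int) 1)
    (PySem.List.nodup_pyRange_one _ _)
    (fun j hj => (PySem.List.mem_pyRange_one.mp hj).imp id (fun h => h)) [] _ _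
    (fun j _ hj => absurd hj (List.not_mem_nil)) h0
  rcases hres : (PySem.List.pyRange 0 ((grid.headD []).length : Int) 1).foldl (seedF grid)
      (List.replicate grid.length (List.replicate (grid.headD []).length false), []) with ⟨v1, q1⟩
  rw [hres] at hfold
  constructor
  · refine ⟨hfold.shape, ?_, ?_, ?_, ?_⟩
    · intro p hp
      obtain ⟨e0, hin, hz⟩ := hfold.qok p hp
      exact ⟨hin, (hfold.char p.1 p.2 hin).mpr (by simpa using hp)⟩
    · intro r c hin ht
      obtain hq := (hfold.char r c hin).mp ht
      obtain ⟨e0, hin2, hz⟩ := hfold.qok (r, c) hq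
      simp only at e0
      subst e0
      exact Reach.seed c hin.2.2.1 hin.2.2.2 hz
    · intro j h1 h2 h3
      have hrows : (0 : Int) < (grid.length : Int) := by
        exact_mod_cast List.length_pos_iff.mpr hg
      refine hfold.seeds j ?_ h3 ⟨le_rfl, hrows, h1, h2⟩
      simp only [List.append_nil, List.mem_reverse]
      exact PySem.List.mem_pyRange_one.mpr ⟨h1, h2⟩
    · intro r c hin ht
      exact Or.inl ((hfold.char r c hin).mp ht)
  · have := hfold.meas
    omega


theorem mem_sweep (grid : List (List Int)) (reach : List (Int × Int)) (p : Int × Int) :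
    p ∈ pvSweep grid (grid.length : Int) ((grid.headD []).length : Int) reach ↔
      InR grid p.1 p.2 ∧ pvGet grid p.1 p.2 = 0 ∧
      (p ∈ reach ∨ (p.1 - 1, p.2) ∈ reach ∨ (p.1 + 1, p.2) ∈ reach ∨
       (p.1, p.2 - 1) ∈ reach ∨ (p.1, p.2 + 1) ∈ reach) := by
  unfold pvSweep
  rw [PySem.Set.mem_ofList, List.mem_flatMap]
  constructor
  · rintro ⟨i, hi, hp⟩
    rw [List.mem_filterMap] at hp
    obtain ⟨j, hj, hsome⟩ := hp
    rw [Option.ite_none_right_eq_some, Option.some.injEq] at hsome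
    obtain ⟨⟨hz, hnb⟩, rfl⟩ := hsome
    rw [PySem.List.mem_pyRange_one] at hi hj
    exact ⟨⟨hi.1, hi.2, hj.1, hj.2⟩, hz, hnb⟩
  · rintro ⟨⟨h1, h2, h3, h4⟩, hz, hnb⟩
    refine ⟨p.1, PySem.List.mem_pyRange_one.mpr ⟨h1, h2⟩, ?_⟩
    rw [List.mem_filterMap]
    refine ⟨p.2, PySem.List.mem_pyRange_one.mpr ⟨h3, h4⟩, ?_⟩
    rw [Option.ite_none_right_eq_some, Option.some.injEq]
    exact ⟨⟨hz, hnb⟩, rfl⟩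

structure BInv (grid : List (List Int)) (reach : List (Int × Int)) : Prop where
  nodup : reach.Nodup
  memok : ∀ p ∈ reach, InR grid p.1 p.2 ∧ pvGet grid p.1 p.2 = 0
  sound : ∀ p ∈ reach, Reach grid p.1 p.2
  seeded : ∀ j : Int, 0 ≤ j → j < ((grid.headD []).length : Int) → pvGet grid 0 j = 0 →
    ((0 : Int), j) ∈ reach

theorem subset_sweep (grid : List (List Int)) (reach : List (Int × Int)) (h : BInv grid reach) :
    reach ⊆ pvSweep grid (grid.length : Int) ((grid.headD []).length : Int) reach := by
  intro p hp
  exact (mem_sweep grid reach p).mpr ⟨(h.memok p hp).1, (h.memok p hp).2, Or.inl hp⟩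

theorem sweep_binv (grid : List (List Int)) (hg : grid ≠ []) (reach : List (Int × Int))
    (h : BInv grid reach) :
    BInv grid (pvSweep grid (grid.length : Int) ((grid.headD []).length : Int) reach) := by
  have hrows : (0 : Int) < (grid.length : Int) := by
    exact_mod_cast List.length_pos_iff.mpr hg
  refine ⟨PySem.Set.nodup_ofList _, ?_, ?_, ?_⟩
  · intro p hp
    obtain ⟨hin, hz, _⟩ := (mem_sweep grid reach p).mp hp
    exact ⟨hin, hz⟩
  · intro p hp
    obtain ⟨hin, hz, hnb⟩ := (mem_sweep grid reach p).mp hp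
    rcases hnb with hm | hm | hm | hm | hm
    · exact h.sound p hm
    · refine Reach.step _ _ _ _ (h.sound _ hm) ?_ hin.1 hin.2.1 hin.2.2.1 hin.2.2.2 hz
      exact Or.inr (Or.inl ⟨by omega, rfl⟩)
    · refine Reach.step _ _ _ _ (h.sound _ hm) ?_ hin.1 hin.2.1 hin.2.2.1 hin.2.2.2 hz
      exact Or.inl ⟨by omega, rfl⟩
    · refine Reach.step _ _ _ _ (h.sound _ hm) ?_ hin.1 hin.2.1 hin.2.2.1 hin.2.2.2 hz
      exact Or.inr (Or.inr (Or.inr ⟨rfl, by omega⟩))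
    · refine Reach.step _ _ _ _ (h.sound _ hm) ?_ hin.1 hin.2.1 hin.2.2.1 hin.2.2.2 hz
      exact Or.inr (Or.inr (Or.inl ⟨rfl, by omega⟩))
  · intro j h1 h2 h3
    exact (mem_sweep grid reach _).mpr ⟨⟨le_rfl, hrows, h1, h2⟩, h3,
      Or.inl (h.seeded j h1 h2 h3)⟩

theorem blen_le (grid : List (List Int)) (reach : List (Int × Int)) (hnd : reach.Nodup)
    (hmem : ∀ p ∈ reach, InR grid p.1 p.2) :
    reach.length ≤ grid.length * (grid.headD []).length := by
  have h1 : reach.toFinset ⊆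
      Finset.Ico (0 : Int) (grid.length : Int) ×ˢ
        Finset.Ico (0 : Int) ((grid.headD []).length : Int) := by
    intro p hp
    obtain hin := hmem p (List.mem_toFinset.mp hp)
    rw [Finset.mem_product, Finset.mem_Ico, Finset.mem_Ico]
    exact ⟨⟨hin.1, hin.2.1⟩, ⟨hin.2.2.1, hin.2.2.2⟩⟩
  have h2 := Finset.card_le_card h1
  rw [List.toFinset_card_of_nodup hnd, Finset.card_product, Int.card_Ico, Int.card_Ico] at h2
  simpa using h2

theorem sweep_grow (grid : List (List Int)) (reach : List (Int × Int)) (h : BInv grid reach)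
    (hne : ¬ PySem.Set.equal (pvSweep grid (grid.length : Int) ((grid.headD []).length : Int)
      reach) reach = true) :
    reach.length + 1 ≤
      (pvSweep grid (grid.length : Int) ((grid.headD []).length : Int) reach).length := by
  have hsp := h.nodup.subperm (subset_sweep grid reach h)
  have hlen := hsp.length_le
  by_contra hlt
  have hle : (pvSweep grid (grid.length : Int) ((grid.headD []).length : Int) reach).length ≤
      reach.length := by omega
  have hperm := hsp.perm_of_length_le hle
  exact hne ((PySem.Set.equal_iff _ _).mpr (fun x => ⟨fun hx => hperm.mem_iff.mpr hx,
    fun hx => hperm.mem_iff.mp hx⟩))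

theorem pvLoop_spec (grid : List (List Int)) (hg : grid ≠ []) :
    ∀ (fuel : Nat) (reach : List (Int × Int)), BInv grid reach →
      grid.length * (grid.headD []).length + 1 ≤ fuel + reach.length →
      BInv grid (pvLoop grid (grid.length : Int) ((grid.headD []).length : Int) fuel reach) ∧
      ∀ p : Int × Int,
        (p ∈ pvSweep grid (grid.length : Int) ((grid.headD []).length : Int)
            (pvLoop grid (grid.length : Int) ((grid.headD []).length : Int) fuel reach) ↔
          p ∈ pvLoop grid (grid.length : Int) ((grid.headD []).length : Int) fuel reach) := by
  intro fuel
  induction fuel with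
  | zero =>
    intro reach h hle
    exact absurd (blen_le grid reach h.nodup (fun p hp => (h.memok p hp).1)) (by omega)
  | succ fuel ih =>
    intro reach h hle
    by_cases heq : PySem.Set.equal (pvSweep grid (grid.length : Int)
        ((grid.headD []).length : Int) reach) reach = true
    · rw [pvLoop, if_pos heq]
      exact ⟨h, fun p => (PySem.Set.equal_iff _ _).mp heq p⟩
    · rw [pvLoop, if_neg heq]
      refine ih _ (sweep_binv grid hg reach h) ?_
      have := sweep_grow grid reach h heq
      omega

theorem bfinal_iff (grid : List (List Int)) (Rf : List (Int × Int))
    (h : BInv grid Rf)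
    (hfix : ∀ p : Int × Int,
      p ∈ pvSweep grid (grid.length : Int) ((grid.headD []).length : Int) Rf ↔ p ∈ Rf) :
    ∀ r c : Int, ((r, c) ∈ Rf ↔ Reach grid r c) := by
  have haux : ∀ r c : Int, Reach grid r c → (r, c) ∈ Rf := by
    intro r c hR
    induction hR with
    | seed j h1 h2 h3 => exact h.seeded j h1 h2 h3
    | step r0 c0 r' c' hR0 hadj b1 b2 b3 b4 hz ih =>
      refine (hfix (r', c')).mp ((mem_sweep grid Rf (r', c')).mpr ⟨⟨b1, b2, b3, b4⟩, hz, ?_⟩)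
      rcases hadj with ⟨e1, e2⟩ | ⟨e1, e2⟩ | ⟨e1, e2⟩ | ⟨e1, e2⟩
      · refine Or.inr (Or.inr (Or.inl ?_))
        show ((r' + 1 : Int), c') ∈ Rf
        have e : ((r' + 1 : Int), c') = (r0, c0) := by
          rw [Prod.mk.injEq]; exact ⟨by omega, by omega⟩
        rw [e]; exact ih
      · refine Or.inr (Or.inl ?_)
        show ((r' - 1 : Int), c') ∈ Rf
        have e : ((r' - 1 : Int), c') = (r0, c0) := by
          rw [Prod.mk.injEq]; exact ⟨by omega, by omega⟩
        rw [e]; exact ih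
      · refine Or.inr (Or.inr (Or.inr (Or.inr ?_)))
        show (r', (c' + 1 : Int)) ∈ Rf
        have e : (r', (c' + 1 : Int)) = (r0, c0) := by
          rw [Prod.mk.injEq]; exact ⟨by omega, by omega⟩
        rw [e]; exact ih
      · refine Or.inr (Or.inr (Or.inr (Or.inl ?_)))
        show (r', (c' - 1 : Int)) ∈ Rf
        have e : (r', (c' - 1 : Int)) = (r0, c0) := by
          rw [Prod.mk.injEq]; exact ⟨by omega, by omega⟩
        rw [e]; exact ih
  intro r c
  exact ⟨fun hm => h.sound (r, c) hm, haux r c⟩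

theorem reach0_mem (grid : List (List Int)) (p : Int × Int) :
    p ∈ PySem.Set.ofList ((PySem.List.pyRange 0 ((grid.headD []).length : Int) 1).filterMap
        (fun j => if pvGet grid 0 j = 0 then some ((0 : Int), j) else none)) ↔
      p.1 = 0 ∧ 0 ≤ p.2 ∧ p.2 < ((grid.headD []).length : Int) ∧ pvGet grid 0 p.2 = 0 := by
  rw [PySem.Set.mem_ofList, List.mem_filterMap]
  constructor
  · rintro ⟨j, hj, hsome⟩
    rw [Option.ite_none_right_eq_some, Option.some.injEq] at hsome
    obtain ⟨hz, rfl⟩ := hsome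
    rw [PySem.List.mem_pyRange_one] at hj
    exact ⟨rfl, hj.1, hj.2, hz⟩
  · rintro ⟨e1, h1, h2, h3⟩
    refine ⟨p.2, PySem.List.mem_pyRange_one.mpr ⟨h1, h2⟩, ?_⟩
    rw [Option.ite_none_right_eq_some, Option.some.injEq]
    refine ⟨h3, ?_⟩
    rw [← e1]

theorem reach0_binv (grid : List (List Int)) (hg : grid ≠ []) :
    BInv grid (PySem.Set.ofList ((PySem.List.pyRange 0 ((grid.headD []).length : Int) 1).filterMap
      (fun j => if pvGet grid 0 j = 0 then some ((0 : Int), j) else none))) := by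
  have hrows : (0 : Int) < (grid.length : Int) := by
    exact_mod_cast List.length_pos_iff.mpr hg
  refine ⟨PySem.Set.nodup_ofList _, ?_, ?_, ?_⟩
  · intro p hp
    obtain ⟨e1, h1, h2, h3⟩ := (reach0_mem grid p).mp hp
    rw [e1]
    exact ⟨⟨le_rfl, hrows, h1, h2⟩, h3⟩
  · intro p hp
    obtain ⟨e1, h1, h2, h3⟩ := (reach0_mem grid p).mp hp
    rw [e1]
    exact Reach.seed p.2 h1 h2 h3
  · intro j h1 h2 h3
    exact (reach0_mem grid _).mpr ⟨rfl, h1, h2, h3⟩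


theorem mem_bad (grid : List (List Int)) (reach : List (Int × Int)) (p : Int × Int) :
    p ∈ pvBad grid (grid.length : Int) ((grid.headD []).length : Int) reach ↔
      InR grid p.1 p.2 ∧ pvGet grid p.1 p.2 = 0 ∧ p ∉ reach := by
  unfold pvBad
  rw [PySem.Set.mem_ofList, List.mem_flatMap]
  constructor
  · rintro ⟨i, hi, hp⟩
    rw [List.mem_filterMap] at hp
    obtain ⟨j, hj, hsome⟩ := hp
    rw [Option.ite_none_right_eq_some, Option.some.injEq] at hsome
    obtain ⟨⟨hz, hnm⟩, rfl⟩ := hsome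
    rw [PySem.List.mem_pyRange_one] at hi hj
    exact ⟨⟨hi.1, hi.2, hj.1, hj.2⟩, hz, hnm⟩
  · rintro ⟨⟨h1, h2, h3, h4⟩, hz, hnm⟩
    refine ⟨p.1, PySem.List.mem_pyRange_one.mpr ⟨h1, h2⟩, ?_⟩
    rw [List.mem_filterMap]
    refine ⟨p.2, PySem.List.mem_pyRange_one.mpr ⟨h3, h4⟩, ?_⟩
    rw [Option.ite_none_right_eq_some, Option.some.injEq]
    exact ⟨⟨hz, hnm⟩, rfl⟩

theorem set_getD_self {α : Type} (l : List α) (n : Nat) (d : α) : l.set n (l.getD n d) = l := by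
  by_cases h : n < l.length
  · have e : l.getD n d = l[n] := by
      rw [List.getD_eq_getElem?_getD, List.getElem?_eq_getElem h, Option.getD_some]
    rw [e]
    exact List.set_getElem_self h
  · exact List.set_eq_of_length_le (by omega)

theorem fold_row_commute (i : Int) (hi : 0 ≤ i) (P : Int → Prop) [DecidablePred P] :
    ∀ (js : List Int) (out : List (List Int)),
    js.foldl (fun out j => if P j
        then PySem.List.pySetD out i (PySem.List.pySetD (PySem.List.pyGetD out i []) j 4)
        else out) out
      = PySem.List.pySetD out i
          (js.foldl (fun row j => if P j then PySem.List.pySetD row j 4 else row)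
            (PySem.List.pyGetD out i [])) := by
  intro js
  induction js with
  | nil =>
    intro out
    simp only [List.foldl_nil]
    obtain ⟨n, rfl⟩ := Int.eq_ofNat_of_zero_le hi
    rw [PySem.List.pySetD_of_nonneg _ _ hi, PySem.List.pyGetD_natCast, Int.toNat_natCast]
    exact (set_getD_self out n []).symm
  | cons j js ih =>
    intro out
    rw [List.foldl_cons, List.foldl_cons]
    by_cases hP : P j
    · rw [if_pos hP, if_pos hP, ih]
      obtain ⟨n, rfl⟩ := Int.eq_ofNat_of_zero_le hi
      by_cases hn : n < out.length
      · have e1 : PySem.List.pyGetD (PySem.List.pySetD out (n : Int)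
            (PySem.List.pySetD (PySem.List.pyGetD out (n : Int) []) j 4)) (n : Int) []
            = PySem.List.pySetD (PySem.List.pyGetD out (n : Int) []) j 4 := by
          rw [PySem.List.pySetD_natCast, PySem.List.pyGetD_natCast]
          exact getD_set_self out n _ [] hn
        rw [e1, PySem.List.pySetD_natCast, PySem.List.pySetD_natCast, PySem.List.pySetD_natCast,
          List.set_set]
      · have e0 : PySem.List.pySetD out (n : Int)
            (PySem.List.pySetD (PySem.List.pyGetD out (n : Int) []) j 4) = out := by
          rw [PySem.List.pySetD_natCast]
          exact List.set_eq_of_length_le (by omega)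
        rw [e0, PySem.List.pySetD_natCast, PySem.List.pySetD_natCast]
        rw [List.set_eq_of_length_le (by omega), List.set_eq_of_length_le (by omega)]
    · rw [if_neg hP, if_neg hP, ih]

theorem rowW_spec (P : Int → Prop) [DecidablePred P] :
    ∀ (js : List Int), (∀ j ∈ js, 0 ≤ j) → ∀ (row : List Int),
    (js.foldl (fun row j => if P j then PySem.List.pySetD row j 4 else row) row).length
        = row.length ∧
    ∀ k : Nat,
      (js.foldl (fun row j => if P j then PySem.List.pySetD row j 4 else row) row).getD k 0 =
        if (k : Int) ∈ js ∧ P (k : Int) ∧ k < row.length then 4 else row.getD k 0 := by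
  intro js
  induction js with
  | nil => intro _ row; simp
  | cons j js ih =>
    intro hnn row
    rw [List.foldl_cons]
    have hj0 : 0 ≤ j := hnn j List.mem_cons_self
    obtain ⟨n, rfl⟩ := Int.eq_ofNat_of_zero_le hj0
    have hstep : (if P (n : Int) then PySem.List.pySetD row (n : Int) 4 else row).length
        = row.length := by
      split
      · rw [PySem.List.pySetD_natCast, List.length_set]
      · rfl
    obtain ⟨ihlen, ihget⟩ := ih (fun j' hj' => hnn j' (List.mem_cons_of_mem _ hj'))
      (if P (n : Int) then PySem.List.pySetD row (n : Int) 4 else row)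
    refine ⟨by rw [ihlen, hstep], ?_⟩
    intro k
    rw [ihget k, hstep]
    have hgd : (if P (n : Int) then PySem.List.pySetD row (n : Int) 4 else row).getD k 0 =
        if k = n ∧ P (n : Int) ∧ k < row.length then 4 else row.getD k 0 := by
      by_cases hP : P (n : Int)
      · rw [if_pos hP, PySem.List.pySetD_natCast]
        by_cases hk : k = n
        · subst hk
          by_cases hlen : k < row.length
          · rw [getD_set_self _ _ _ _ hlen, if_pos ⟨rfl, hP, hlen⟩]
          · rw [List.set_eq_of_length_le (by omega), if_neg (by tauto)]
        · rw [getD_set_ne _ _ _ _ _ (fun h => hk h.symm), if_neg (by tauto)]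
      · rw [if_neg hP, if_neg (by tauto)]
    rw [hgd]
    by_cases hmem : (k : Int) ∈ js <;> by_cases hP : P (k : Int) <;>
      by_cases hlen : k < row.length <;> by_cases hk : k = n <;>
      simp_all [List.mem_cons]

theorem outfold_spec (W : Int → List Int → List Int) :
    ∀ (is : List Int), (∀ i ∈ is, 0 ≤ i) → is.Nodup → ∀ (out : List (List Int)),
      (∀ i ∈ is, i < (out.length : Int)) →
      (is.foldl (fun out i => PySem.List.pySetD out i (W i (PySem.List.pyGetD out i []))) out).length
          = out.length ∧
      ∀ r : Nat,
        (is.foldl (fun out i => PySem.List.pySetD out i (W i (PySem.List.pyGetD out i []))) out).getD r []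
          = if (r : Int) ∈ is then W r (out.getD r []) else out.getD r [] := by
  intro is
  induction is with
  | nil => intro _ _ out _; simp
  | cons i is ih =>
    intro hnn hnd out hbnd
    rw [List.foldl_cons]
    have hi0 : 0 ≤ i := hnn i List.mem_cons_self
    obtain ⟨n, rfl⟩ := Int.eq_ofNat_of_zero_le hi0
    have hn : n < out.length := by
      have := hbnd (n : Int) List.mem_cons_self
      omega
    have hset : PySem.List.pySetD out (n : Int) (W (n : Int) (PySem.List.pyGetD out (n : Int) []))
        = out.set n (W (n : Int) (out.getD n [])) := by
      rw [PySem.List.pySetD_natCast, PySem.List.pyGetD_natCast]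
    rw [hset]
    obtain ⟨ihlen, ihget⟩ := ih (fun i' hi' => hnn i' (List.mem_cons_of_mem _ hi'))
      (List.nodup_cons.mp hnd).2 (out.set n (W (n : Int) (out.getD n [])))
      (fun i' hi' => by rw [List.length_set]; exact hbnd i' (List.mem_cons_of_mem _ hi'))
    refine ⟨by rw [ihlen, List.length_set], ?_⟩
    intro r
    rw [ihget r]
    by_cases hmem : (r : Int) ∈ is
    · have hne : ¬ r = n := by
        intro h
        subst h
        exact (List.nodup_cons.mp hnd).1 hmem
      rw [getD_set_ne _ _ _ _ _ (fun h => hne h.symm), if_pos hmem,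
        if_pos (List.mem_cons_of_mem _ hmem)]
    · by_cases hk : r = n
      · subst hk
        rw [getD_set_self _ _ _ _ hn, if_neg hmem, if_pos List.mem_cons_self]
      · rw [getD_set_ne _ _ _ _ _ (fun h => hk h.symm), if_neg hmem, if_neg (by
          rw [List.mem_cons]
          rintro (h | h)
          · exact hk (by exact_mod_cast h)
          · exact hmem h)]


theorem getElem?_eq_some_getD {α : Type} (l : List α) (r : Nat) (d : α) (h : r < l.length) :
    l[r]? = some (l.getD r d) := by
  rw [List.getD_eq_getElem?_getD, List.getElem?_eq_getElem h, Option.getD_some]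

-- B's enumerate-shaped output, reshaped into maps over index ranges
theorem alt_output_reshape (grid : List (List Int)) (Bad : List (Int × Int)) :
    ((PySem.List.enumerate grid).map fun p =>
      (PySem.List.enumerate p.2).map fun q =>
        if (p.1, q.1) ∈ Bad then 4 else q.2)
    = (PySem.List.pyRange 0 (grid.length : Int) 1).map (fun i =>
        (PySem.List.pyRange 0 (PySem.List.len (PySem.List.pyGetD grid i [])) 1).map (fun j =>
          if (i, j) ∈ Bad then 4 else pvGet grid i j)) := by
  rw [PySem.List.enumerate_eq_map_pyRange (d := ([] : List Int)), List.map_map]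
  rw [PySem.List.len_eq]
  refine List.map_congr_left ?_
  intro i hi
  simp only [Function.comp]
  rw [PySem.List.enumerate_eq_map_pyRange (d := (0 : Int)), List.map_map]
  rw [PySem.List.len_eq]
  rfl

theorem output_eq (grid : List (List Int)) (hpre : Pre_transform grid)
    (VF : List (List Bool)) (Bad : List (Int × Int))
    (hiffA : ∀ r c : Int, InR grid r c → (pvVGet VF r c = true ↔ Reach grid r c))
    (hBad : ∀ r c : Int, ((r, c) ∈ Bad ↔
      (InR grid r c ∧ pvGet grid r c = 0 ∧ ¬ Reach grid r c))) :
    (PySem.List.pyRange 0 (grid.length : Int) 1).foldl (fun out i =>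
      (PySem.List.pyRange 0 ((grid.headD []).length : Int) 1).foldl (fun out j =>
        if pvGet grid i j = 0 ∧ pvVGet VF i j = false
        then PySem.List.pySetD out i (PySem.List.pySetD (PySem.List.pyGetD out i []) j 4)
        else out) out) grid
    = (PySem.List.pyRange 0 (grid.length : Int) 1).map (fun i =>
        (PySem.List.pyRange 0 (PySem.List.len (PySem.List.pyGetD grid i [])) 1).map (fun j =>
          if (i, j) ∈ Bad then 4 else pvGet grid i j)) := by
  have hnnR : ∀ i ∈ PySem.List.pyRange 0 (grid.length : Int) 1, 0 ≤ i :=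
    fun i hi => (PySem.List.mem_pyRange_one.mp hi).1
  have hbndR : ∀ i ∈ PySem.List.pyRange 0 (grid.length : Int) 1, i < (grid.length : Int) :=
    fun i hi => (PySem.List.mem_pyRange_one.mp hi).2
  have hnnC : ∀ j ∈ PySem.List.pyRange 0 ((grid.headD []).length : Int) 1, 0 ≤ j :=
    fun j hj => (PySem.List.mem_pyRange_one.mp hj).1
  have hcomm : (PySem.List.pyRange 0 (grid.length : Int) 1).foldl (fun out i =>
      (PySem.List.pyRange 0 ((grid.headD []).length : Int) 1).foldl (fun out j =>
        if pvGet grid i j = 0 ∧ pvVGet VF i j = false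
        then PySem.List.pySetD out i (PySem.List.pySetD (PySem.List.pyGetD out i []) j 4)
        else out) out) grid
      = (PySem.List.pyRange 0 (grid.length : Int) 1).foldl (fun out i =>
          PySem.List.pySetD out i
            ((PySem.List.pyRange 0 ((grid.headD []).length : Int) 1).foldl (fun row j =>
              if pvGet grid i j = 0 ∧ pvVGet VF i j = false
              then PySem.List.pySetD row j 4 else row) (PySem.List.pyGetD out i []))) grid :=
    PySem.List.foldl_congr_mem _ _ _ _ (fun acc i hi =>
      fold_row_commute i (hnnR i hi)
        (fun j => pvGet grid i j = 0 ∧ pvVGet VF i j = false) _ acc)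
  rw [hcomm]
  obtain ⟨hlen, hget⟩ := outfold_spec
    (fun i row => (PySem.List.pyRange 0 ((grid.headD []).length : Int) 1).foldl (fun row j =>
      if pvGet grid i j = 0 ∧ pvVGet VF i j = false
      then PySem.List.pySetD row j 4 else row) row)
    (PySem.List.pyRange 0 (grid.length : Int) 1) hnnR (PySem.List.nodup_pyRange_one _ _)
    grid hbndR
  apply List.ext_getElem?
  intro r
  by_cases hr : r < grid.length
  · rw [getElem?_eq_some_getD _ r [] (by rw [hlen]; exact hr),
      PySem.List.getElem?_map_pyRange_zero _ grid.length r hr, hget r,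
      if_pos (PySem.List.mem_pyRange_one.mpr ⟨Int.natCast_nonneg r, by exact_mod_cast hr⟩)]
    refine congrArg some ?_
    have hrowlen : (grid.headD []).length ≤ (grid.getD r []).length :=
      hpre _ (getD_mem_of_lt grid r [] hr)
    have hlenr : PySem.List.len (PySem.List.pyGetD grid (r : Int) []) =
        ((grid.getD r []).length : Int) := by
      rw [PySem.List.pyGetD_natCast]
      simp [PySem.List.len_eq]
    rw [hlenr]
    obtain ⟨hWlen, hWget⟩ := rowW_spec
      (fun j => pvGet grid (r : Int) j = 0 ∧ pvVGet VF (r : Int) j = false) _ hnnC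
      (grid.getD r [])
    apply List.ext_getElem?
    intro k
    by_cases hk : k < (grid.getD r []).length
    · rw [getElem?_eq_some_getD _ k 0 (by rw [hWlen]; exact hk),
        PySem.List.getElem?_map_pyRange_zero _ _ k hk]
      refine congrArg some ?_
      rw [hWget k]
      have hgg : (grid.getD r []).getD k 0 = pvGet grid (r : Int) (k : Int) := by
        rw [pvGet_toNat grid _ _ (Int.natCast_nonneg r) (Int.natCast_nonneg k)]
        simp [ggetN]
      by_cases hkC : k < (grid.headD []).length
      · have hmem : ((k : Int)) ∈ PySem.List.pyRange 0 ((grid.headD []).length : Int) 1 :=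
          PySem.List.mem_pyRange_one.mpr ⟨Int.natCast_nonneg k, by exact_mod_cast hkC⟩
        have hIn : InR grid (r : Int) (k : Int) :=
          ⟨Int.natCast_nonneg r, by exact_mod_cast hr, Int.natCast_nonneg k,
            by exact_mod_cast hkC⟩
        have hcond : (pvVGet VF (r : Int) (k : Int) = false) ↔
            ¬ Reach grid (r : Int) (k : Int) := by
          rw [show (pvVGet VF (r : Int) (k : Int) = false) ↔
              ¬(pvVGet VF (r : Int) (k : Int) = true) from by simp]
          exact not_congr (hiffA _ _ hIn)
        by_cases hc : pvGet grid (r : Int) (k : Int) = 0 ∧ pvVGet VF (r : Int) (k : Int) = false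
        · rw [if_pos ⟨hmem, hc, hk⟩,
            if_pos ((hBad _ _).mpr ⟨hIn, hc.1, hcond.mp hc.2⟩)]
        · rw [if_neg (fun hh => hc hh.2.1), if_neg (fun hh => by
            obtain ⟨_, hz, hnr⟩ := (hBad _ _).mp hh
            exact hc ⟨hz, hcond.mpr hnr⟩)]
          exact hgg
      · -- beyond the first row's length: A never touches the cell, and it is outside the
        -- rectangle so it is not in B's recolor set either
        have hnmem : ((k : Int)) ∉ PySem.List.pyRange 0 ((grid.headD []).length : Int) 1 := by
          rw [PySem.List.mem_pyRange_one]
          intro hh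
          exact hkC (by exact_mod_cast hh.2)
        rw [if_neg (fun hh => hnmem hh.1), if_neg (fun hh => by
          obtain ⟨hIn, _, _⟩ := (hBad _ _).mp hh
          exact hkC (by exact_mod_cast hIn.2.2.2))]
        exact hgg
    · rw [List.getElem?_eq_none (by rw [hWlen]; omega),
        List.getElem?_eq_none (by rw [List.length_map, PySem.List.length_pyRange_one]; omega)]
  · rw [List.getElem?_eq_none (by rw [hlen]; omega),
      List.getElem?_eq_none (by rw [List.length_map, PySem.List.length_pyRange_one]; omega)]

-- ===== VERDICT =====
theorem transform_spec : Claim_equal_transform := by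
  unfold Claim_equal_transform
  intro grid _ hpre
  unfold Spec_transform transform transform_alt
  by_cases hg : grid = [] ∨ grid.headD [] = []
  · rw [if_pos hg, if_pos hg]
  · rw [if_neg hg, if_neg hg]
    obtain ⟨hg1, hg2⟩ := not_or.mp hg
    obtain ⟨hseedInv, hseedLen⟩ := seed_ainv grid hg1
    have hVF := pvBFS_ainv grid
      (grid.length * (grid.headD []).length + (grid.headD []).length + 1) _ _ hseedInv hseedLen
    have hiffA := afinal_iff grid _ hVF hg1
    have hB0 := reach0_binv grid hg1
    obtain ⟨hBInv, hBfix⟩ := pvLoop_spec grid hg1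
      (grid.length * (grid.headD []).length + 1) _ hB0 (by omega)
    have hiffB := bfinal_iff grid _ hBInv hBfix
    have hBad : ∀ r c : Int,
        ((r, c) ∈ pvBad grid (grid.length : Int) ((grid.headD []).length : Int)
            (pvLoop grid (grid.length : Int) ((grid.headD []).length : Int)
              (grid.length * (grid.headD []).length + 1)
              (PySem.Set.ofList ((PySem.List.pyRange 0 ((grid.headD []).length : Int) 1).filterMap
                fun j => if pvGet grid 0 j = 0 then some ((0 : Int), j) else none))) ↔
          (InR grid r c ∧ pvGet grid r c = 0 ∧ ¬ Reach grid r c)) := by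
      intro r c
      rw [mem_bad]
      exact and_congr_right fun _ => and_congr_right fun _ => not_congr (hiffB r c)
    exact (output_eq grid hpre _ _ hiffA hBad).trans (alt_output_reshape grid _).symm
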